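-- pv_equiv track=rewrite | github.com/zsy-ctrl/geomapgen | unimapgen/geo/dataset.py | _build_tile_scan_neighbors
-- ===== SOURCE A (Python) =====
-- from typing import Dict, List, Optional, Sequence, Tuple
--
-- def _build_tile_scan_neighbors(tile_windows: Sequence[Optional[Dict]]) -> List[Dict[str, bool]]:
--     if not tile_windows:
--         return []
--     if tile_windows == [None]:
--         return [{"left": False, "top": False}]
--     seen_rows = set()
--     seen_cols = set()
--     out: List[Dict[str, bool]] = []
--     for tile_window in tile_windows:
--         if tile_window is None:
--             out.append({"left": False, "top": False})
--             continue
--         row_key = int(tile_window["y0"])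
--         col_key = int(tile_window["x0"])
--         out.append({"left": row_key in seen_rows, "top": col_key in seen_cols})
--         seen_rows.add(row_key)
--         seen_cols.add(col_key)
--     return out
-- ===== SOURCE B (Python) =====
-- from typing import Dict, List, Optional, Sequence
--
--
-- def _build_tile_scan_neighbors(tile_windows: Sequence[Optional[Dict]]) -> List[Dict[str, bool]]:
--     # Pass 1: record the index of the first tile occupying each row / column.
--     row_first: Dict[int, int] = {}
--     col_first: Dict[int, int] = {}
--     for i, tile_window in enumerate(tile_windows):
--         if tile_window is None:
--             continue
--         row_key = int(tile_window["y0"])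
--         col_key = int(tile_window["x0"])
--         if row_key not in row_first:
--             row_first[row_key] = i
--         if col_key not in col_first:
--             col_first[col_key] = i
--     # Pass 2: a tile has a left/top neighbor iff its row/col first appeared earlier.
--     out: List[Dict[str, bool]] = []
--     for i, tile_window in enumerate(tile_windows):
--         if tile_window is None:
--             out.append({"left": False, "top": False})
--         else:
--             out.append({
--                 "left": row_first[int(tile_window["y0"])] < i,
--                 "top": col_first[int(tile_window["x0"])] < i,
--             })
--     return out
-- ===== Notes on version B (the rewrite author's own statement) =====
-- stated objective: alternative
-- what changed: Replaces the single streaming pass with mutable seen-row/seen-col sets by a two-pass scheme: a first pass records in two dicts the index at which each row/column key first occurs, and a second pass emits left/top by comparing that first-occurrence index with the current index; A's redundant single-tile special case is dropped since the loop already yields the same result.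
import Mathlib
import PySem

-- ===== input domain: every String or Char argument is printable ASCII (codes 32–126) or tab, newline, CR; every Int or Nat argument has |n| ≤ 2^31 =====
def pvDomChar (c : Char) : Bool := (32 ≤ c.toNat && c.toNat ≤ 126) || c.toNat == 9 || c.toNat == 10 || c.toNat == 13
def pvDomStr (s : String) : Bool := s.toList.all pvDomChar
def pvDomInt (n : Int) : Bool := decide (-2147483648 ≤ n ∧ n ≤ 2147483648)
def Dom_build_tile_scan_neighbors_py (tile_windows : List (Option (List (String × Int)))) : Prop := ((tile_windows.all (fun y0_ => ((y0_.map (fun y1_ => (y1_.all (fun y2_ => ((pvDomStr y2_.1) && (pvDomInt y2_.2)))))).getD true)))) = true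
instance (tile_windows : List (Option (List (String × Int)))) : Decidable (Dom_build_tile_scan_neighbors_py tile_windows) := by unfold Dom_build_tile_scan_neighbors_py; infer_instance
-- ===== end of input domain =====

-- B replaces A's streaming seen-sets by a two-pass scheme (first-occurrence-index
-- dicts, then index comparison); same O(n) cost, different decomposition.


-- ===== PORT A =====
-- tile_window["y0"] / ["x0"]: dict lookup (first match); getD 0 is unreachable under Pre_
def pvRowKey (tw : List (String × Int)) : Int := ((PySem.Dict.mk tw).get? "y0").getD 0
def pvColKey (tw : List (String × Int)) : Int := ((PySem.Dict.mk tw).get? "x0").getD 0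

-- A's for-loop over tile_windows carrying seen_rows / seen_cols and emitting out
def pvALoop : List (Option (List (String × Int))) → PySem.Set Int → PySem.Set Int → List (List (String × Bool))
  | [], _, _ => []
  | none :: rest, sr, sc => [("left", false), ("top", false)] :: pvALoop rest sr sc
  | some tw :: rest, sr, sc =>
      let rk := pvRowKey tw
      let ck := pvColKey tw
      [("left", PySem.Set.contains sr rk), ("top", PySem.Set.contains sc ck)] ::
        pvALoop rest (PySem.Set.add sr rk) (PySem.Set.add sc ck)

def build_tile_scan_neighbors_py (tile_windows : List (Option (List (String × Int)))) : List (List (String × Bool)) :=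
  if tile_windows = [] then []
  else if tile_windows = [none] then [[("left", false), ("top", false)]]
  else pvALoop tile_windows PySem.Set.empty PySem.Set.empty

-- ===== PORT B =====
-- Pass 1: fold over enumerate(tile_windows) recording first-occurrence index per row/col key
def pvBFirstStep (st : PySem.Dict Int Int × PySem.Dict Int Int) (p : Int × Option (List (String × Int))) :
    PySem.Dict Int Int × PySem.Dict Int Int :=
  match p.2 with
  | none => st
  | some tw =>
      let rk := pvRowKey tw
      let ck := pvColKey tw
      let rf := if st.1.contains rk then st.1 else st.1.insert rk p.1
      let cf := if st.2.contains ck then st.2 else st.2.insert ck p.1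
      (rf, cf)

-- Pass 2: one output row per enumerated tile, comparing first index against current index
def pvBEmit (rf cf : PySem.Dict Int Int) (p : Int × Option (List (String × Int))) : List (String × Bool) :=
  match p.2 with
  | none => [("left", false), ("top", false)]
  | some tw =>
      [("left", decide (rf.getD (pvRowKey tw) 0 < p.1)),
       ("top", decide (cf.getD (pvColKey tw) 0 < p.1))]

def build_tile_scan_neighbors_py_alt (tile_windows : List (Option (List (String × Int)))) : List (List (String × Bool)) :=
  let st := (PySem.List.enumerate tile_windows 0).foldl pvBFirstStep (PySem.Dict.empty, PySem.Dict.empty)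
  (PySem.List.enumerate tile_windows 0).map (pvBEmit st.1 st.2)

-- ===== PRECONDITION & SPEC =====
-- Pre_ excludes exactly the inputs on which Python A raises KeyError: a non-None tile
-- dict missing key "y0" or "x0" (B raises there too).
def Pre_build_tile_scan_neighbors_py (tile_windows : List (Option (List (String × Int)))) : Prop :=
  ∀ tw ∈ tile_windows, ∀ d ∈ tw, "y0" ∈ d.map Prod.fst ∧ "x0" ∈ d.map Prod.fst
instance (tile_windows : List (Option (List (String × Int)))) : Decidable (Pre_build_tile_scan_neighbors_py tile_windows) := by unfold Pre_build_tile_scan_neighbors_py; infer_instance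
def pvWitness_build_tile_scan_neighbors_py : (List (Option (List (String × Int)))) :=
  [some [("x0", 0), ("y0", 0)], none, some [("x0", 3), ("y0", 0)]]
def Spec_build_tile_scan_neighbors_py (tile_windows : List (Option (List (String × Int)))) (out : List (List (String × Bool))) : Prop := out = build_tile_scan_neighbors_py_alt tile_windows
instance (tile_windows : List (Option (List (String × Int)))) (out : List (List (String × Bool))) : Decidable (Spec_build_tile_scan_neighbors_py tile_windows out) := by unfold Spec_build_tile_scan_neighbors_py; infer_instance

-- ===== CLAIM (what is proved, stated in full; the proofs are below) =====
def Claim_equal_build_tile_scan_neighbors_py : Prop := ∀ (tile_windows : List (Option (List (String × Int)))), Dom_build_tile_scan_neighbors_py tile_windows → Pre_build_tile_scan_neighbors_py tile_windows → Spec_build_tile_scan_neighbors_py tile_windows (build_tile_scan_neighbors_py tile_windows)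

-- ===== LEMMAS AND PROOFS =====

-- single-dict version of pass 1, parametric in the key function
def pvFold (key : List (String × Int) → Int) :
    List (Int × Option (List (String × Int))) → PySem.Dict Int Int → PySem.Dict Int Int
  | [], d => d
  | (_, none) :: l, d => pvFold key l d
  | (i, some tw) :: l, d =>
      pvFold key l (if d.contains (key tw) then d else d.insert (key tw) i)

-- index (offset by s) of the first non-None element whose key is rk
def pvFind (key : List (String × Int) → Int) (rk : Int) :
    List (Option (List (String × Int))) → Int → Option Int
  | [], _ => none
  | none :: l, s => pvFind key rk l (s + 1)
  | some tw :: l, s => if key tw = rk then some s else pvFind key rk l (s + 1)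

-- keys of the non-None elements, in order
def pvKeys (key : List (String × Int) → Int) (l : List (Option (List (String × Int)))) : List Int :=
  l.filterMap (fun o => o.map key)

lemma pv_split (l : List (Int × Option (List (String × Int))))
    (d1 d2 : PySem.Dict Int Int) :
    l.foldl pvBFirstStep (d1, d2) = (pvFold pvRowKey l d1, pvFold pvColKey l d2) := by
  induction l generalizing d1 d2 with
  | nil => rfl
  | cons p l ih =>
      obtain ⟨i, o⟩ := p
      cases o <;> simp [List.foldl_cons, pvBFirstStep, pvFold, ih]

lemma pv_fold_get (key : List (String × Int) → Int) (rk : Int) :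
    ∀ (ws : List (Option (List (String × Int)))) (s : Int) (d : PySem.Dict Int Int),
      (pvFold key (PySem.List.enumerate ws s) d).get? rk
        = (d.get? rk).or (pvFind key rk ws s) := by
  intro ws
  induction ws with
  | nil => intro s d; simp [PySem.List.enumerate_nil, pvFold, pvFind]
  | cons o l ih =>
      intro s d
      cases o with
      | none =>
          rw [PySem.List.enumerate_cons]
          simpa [pvFold, pvFind] using ih (s + 1) d
      | some tw =>
          rw [PySem.List.enumerate_cons]
          show (pvFold key ((s, some tw) :: PySem.List.enumerate l (s + 1)) d).get? rk = _
          rw [pvFold, ih]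
          by_cases h : key tw = rk
          · subst h
            cases hc : d.contains (key tw) with
            | true =>
                have hs : (d.get? (key tw)).isSome := by
                  rw [← PySem.Dict.contains_eq_isSome_get?]; exact hc
                obtain ⟨v, hv⟩ := Option.isSome_iff_exists.mp hs
                simp [pvFind, hv]
            | false =>
                have hn : d.get? (key tw) = none := by
                  have := PySem.Dict.contains_eq_isSome_get? (d := d) (k := key tw)
                  rw [hc] at this
                  simpa using this.symm
                simp [pvFind, hn, PySem.Dict.get?_insert_self]
          · have hg : ∀ (d' : PySem.Dict Int Int) (v : Int),
                (d'.insert (key tw) v).get? rk = d'.get? rk := fun d' v => by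
              rw [PySem.Dict.get?_insert]
              exact if_neg (Ne.symm h)
            cases hc : d.contains (key tw) <;> simp [pvFind, h, hg]

lemma pv_find_append (key : List (String × Int) → Int) (rk : Int) :
    ∀ (pre l : List (Option (List (String × Int)))) (s : Int),
      pvFind key rk (pre ++ l) s
        = (pvFind key rk pre s).or (pvFind key rk l (s + pre.length)) := by
  intro pre
  induction pre with
  | nil => intro l s; simp [pvFind]
  | cons o p ih =>
      intro l s
      cases o with
      | none =>
          rw [List.cons_append, pvFind, pvFind, ih]
          congr 2
          simp only [List.length_cons]
          push_cast; ring
      | some tw =>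
          rw [List.cons_append, pvFind, pvFind]
          by_cases h : key tw = rk
          · simp [h]
          · rw [if_neg h, if_neg h, ih]
            congr 2
            simp only [List.length_cons]
            push_cast; ring

lemma pv_find_bound (key : List (String × Int) → Int) (rk : Int) :
    ∀ (pre : List (Option (List (String × Int)))) (s j : Int),
      pvFind key rk pre s = some j → s ≤ j ∧ j < s + pre.length := by
  intro pre
  induction pre with
  | nil => intro s j h; simp [pvFind] at h
  | cons o p ih =>
      intro s j h
      cases o with
      | none =>
          rw [pvFind] at h
          have := ih (s + 1) j h
          simp only [List.length_cons]
          push_cast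
          omega
      | some tw =>
          rw [pvFind] at h
          by_cases hk : key tw = rk
          · rw [if_pos hk, Option.some_inj] at h
            subst h
            simp only [List.length_cons]
            push_cast
            omega
          · rw [if_neg hk] at h
            have := ih (s + 1) j h
            simp only [List.length_cons]
            push_cast
            omega

lemma pv_find_none_iff (key : List (String × Int) → Int) (rk : Int) :
    ∀ (pre : List (Option (List (String × Int)))) (s : Int),
      pvFind key rk pre s = none ↔ rk ∉ pvKeys key pre := by
  intro pre
  induction pre with
  | nil => intro s; simp [pvFind, pvKeys]
  | cons o p ih =>
      intro s
      cases o with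
      | none => rw [pvFind]; simpa [pvKeys] using ih (s + 1)
      | some tw =>
          rw [pvFind]
          by_cases hk : key tw = rk
          · simp [hk, pvKeys]
          · rw [if_neg hk]
            simp only [pvKeys, List.filterMap_cons, Option.map_some]
            rw [ih (s + 1)]
            simp [pvKeys, Ne.symm hk]

-- the head comparison: membership in the prefix keys ↔ first index < current index
lemma pv_head (key : List (String × Int) → Int)
    (pre rest : List (Option (List (String × Int)))) (tw : List (String × Int)) :
    PySem.Set.contains (PySem.Set.ofList (pvKeys key pre)) (key tw)
      = decide ((pvFold key (PySem.List.enumerate (pre ++ some tw :: rest) 0)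
          PySem.Dict.empty).getD (key tw) 0 < (pre.length : Int)) := by
  rw [PySem.Dict.getD_eq_get?_getD, pv_fold_get, PySem.Dict.get?_empty, Option.none_or,
    pv_find_append]
  have hsome : pvFind key (key tw) (some tw :: rest) (0 + (pre.length : Int))
      = some ((pre.length : Int)) := by
    rw [pvFind, if_pos rfl]; norm_num
  cases hm : pvFind key (key tw) pre 0 with
  | none =>
      have hnot : key tw ∉ pvKeys key pre := (pv_find_none_iff key (key tw) pre 0).mp hm
      have : PySem.Set.contains (PySem.Set.ofList (pvKeys key pre)) (key tw) = false := by
        rw [← Bool.not_eq_true]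
        intro hc
        exact hnot ((PySem.Set.mem_ofList _ _).mp ((PySem.Set.contains_iff _ _).mp hc))
      rw [this, hsome]
      simp
  | some j =>
      have hb := pv_find_bound key (key tw) pre 0 j hm
      have hmem : key tw ∈ pvKeys key pre := by
        by_contra hnot
        rw [(pv_find_none_iff key (key tw) pre 0).mpr hnot] at hm
        simp at hm
      have : PySem.Set.contains (PySem.Set.ofList (pvKeys key pre)) (key tw) = true :=
        (PySem.Set.contains_iff _ _).mpr ((PySem.Set.mem_ofList _ _).mpr hmem)
      rw [this, Option.some_or]
      simp only [Option.getD_some]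
      rw [eq_comm, decide_eq_true_eq]
      omega

lemma pv_keys_append (key : List (String × Int) → Int)
    (pre : List (Option (List (String × Int)))) (o : Option (List (String × Int))) :
    pvKeys key (pre ++ [o]) = pvKeys key pre ++ (o.map key).toList := by
  cases o <;> simp [pvKeys]

-- main loop invariant: A's loop over the suffix equals B's second pass over the suffix
lemma pv_main (ws : List (Option (List (String × Int)))) :
    ∀ (rest pre : List (Option (List (String × Int)))), pre ++ rest = ws →
      pvALoop rest (PySem.Set.ofList (pvKeys pvRowKey pre)) (PySem.Set.ofList (pvKeys pvColKey pre))
        = (PySem.List.enumerate rest (pre.length : Int)).map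
            (pvBEmit (pvFold pvRowKey (PySem.List.enumerate ws 0) PySem.Dict.empty)
                     (pvFold pvColKey (PySem.List.enumerate ws 0) PySem.Dict.empty)) := by
  intro rest
  induction rest with
  | nil => intro pre h; simp [pvALoop, PySem.List.enumerate_nil]
  | cons o rest ih =>
      intro pre h
      cases o with
      | none =>
          rw [pvALoop, PySem.List.enumerate_cons, List.map_cons]
          have h' : (pre ++ [none]) ++ rest = ws := by simpa using h
          have := ih (pre ++ [none]) h'
          rw [pv_keys_append, pv_keys_append] at this
          simp only [Option.map_none, Option.toList_none, List.append_nil] at this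
          rw [this]
          have hlen : ((pre ++ [(none : Option (List (String × Int)))]).length : Int)
              = (pre.length : Int) + 1 := by simp
          rw [hlen]
          rfl
      | some tw =>
          subst h
          rw [pvALoop, PySem.List.enumerate_cons, List.map_cons]
          have htail := ih (pre ++ [some tw]) (by simp)
          rw [pv_keys_append, pv_keys_append] at htail
          simp only [Option.map_some, Option.toList_some] at htail
          rw [PySem.Set.ofList_append_singleton, PySem.Set.ofList_append_singleton] at htail
          have hlen : (((pre ++ [some tw]).length : Nat) : Int) = (pre.length : Int) + 1 := by
            simp
          rw [hlen] at htail
          rw [htail]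
          congr 1
          simp only [pvBEmit]
          rw [← pv_head pvRowKey pre rest tw, ← pv_head pvColKey pre rest tw]

-- ===== VERDICT (by name: the statement is the Claim_ definition above) =====
theorem build_tile_scan_neighbors_py_spec : Claim_equal_build_tile_scan_neighbors_py := by
  intro ws _hdom _hpre
  unfold Spec_build_tile_scan_neighbors_py build_tile_scan_neighbors_py
  split_ifs with h0 h1
  · subst h0; rfl
  · subst h1; decide
  · rw [build_tile_scan_neighbors_py_alt]
    simp only [pv_split]
    have := pv_main ws ws [] rfl
    simp only [pvKeys, List.filterMap_nil, List.length_nil, Nat.cast_zero] at this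
    exact this
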